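-- pv_equiv track=rewrite | github.com/OJoshuaCG/SE_6_U2 | algoritmo_genetico/benchmarks.py | ellipsoid
-- ===== SOURCE A (Python) =====
-- def ellipsoid(a):
--     sumi = 0
--     for i in range(len(a)):
--         sumj = 0
--         for j in range(i):
--             sumj += a[j]**2
--         sumi += sumj
--
--     return(sumi)
-- ===== SOURCE B (Python) =====
-- def ellipsoid(a):
--     total = 0
--     running = 0
--     for x in a:
--         total += running
--         running += x * x
--     return total
-- ===== Notes on version B (the rewrite author's own statement) =====
-- stated objective: faster
-- what changed: Replaced the O(n^2) nested loops (recomputing the prefix sum of squares from scratch for every i) with a single pass that maintains the running prefix sum of squares and adds it once per element.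
import Mathlib
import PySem

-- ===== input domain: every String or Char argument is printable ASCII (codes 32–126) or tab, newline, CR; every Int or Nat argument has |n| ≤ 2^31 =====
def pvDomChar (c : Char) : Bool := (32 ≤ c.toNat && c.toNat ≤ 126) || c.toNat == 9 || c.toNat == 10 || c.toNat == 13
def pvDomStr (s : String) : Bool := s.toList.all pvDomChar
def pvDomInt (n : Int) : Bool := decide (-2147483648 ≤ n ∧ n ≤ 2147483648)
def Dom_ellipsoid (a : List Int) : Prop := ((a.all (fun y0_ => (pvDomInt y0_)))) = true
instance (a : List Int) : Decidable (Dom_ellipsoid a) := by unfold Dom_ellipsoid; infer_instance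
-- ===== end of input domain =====

-- B replaces A's O(n^2) nested loops by a single pass keeping a running prefix sum of squares (faster).
-- ===== PORT A =====
-- Literal port of A: outer loop over range(len(a)); inner loop over range(i) summing a[j]**2.
def ellipsoid (a : List Int) : Int :=
  (PySem.List.pyRange 0 (PySem.List.len a) 1).foldl
    (fun sumi i =>
      sumi + (PySem.List.pyRange 0 i 1).foldl
        (fun sumj j => sumj + (PySem.List.pyGetD a j 0) ^ 2) 0)
    0

-- ===== PORT B =====
-- One pass: total += running; running += x*x.
def ellipsoid_alt (a : List Int) : Int :=
  (a.foldl (fun (p : Int × Int) x => (p.1 + p.2, p.2 + x * x)) (0, 0)).1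

-- ===== PRECONDITION & SPEC =====
def Spec_ellipsoid (a : List Int) (out : Int) : Prop := out = ellipsoid_alt a
instance (a : List Int) (out : Int) : Decidable (Spec_ellipsoid a out) := by unfold Spec_ellipsoid; infer_instance

-- ===== CLAIM =====
def Claim_equal_ellipsoid : Prop := ∀ (a : List Int), Dom_ellipsoid a → Spec_ellipsoid a (ellipsoid a)

-- ===== LEMMAS AND PROOFS =====

def sumsq (xs : List Int) : Int := (xs.map (fun x => x * x)).sum

def E (xs : List Int) : Int := ((List.range xs.length).map (fun i => sumsq (xs.take i))).sum

theorem inner_eq (a : List Int) (i : Nat) (hi : i ≤ a.length) :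
    (PySem.List.pyRange 0 (i : Int) 1).foldl
      (fun sumj j => sumj + (PySem.List.pyGetD a j 0) ^ 2) 0 = sumsq (a.take i) := by
  have hlen : PySem.List.len (a.take i) = (i : Int) := by
    simp [PySem.List.len, hi]
  have hcongr :
      (PySem.List.pyRange 0 (i : Int) 1).foldl
        (fun sumj j => sumj + (PySem.List.pyGetD a j 0) ^ 2) 0 =
      (PySem.List.pyRange 0 (i : Int) 1).foldl
        (fun sumj j => sumj + (PySem.List.pyGetD (a.take i) j 0) ^ 2) 0 := by
    apply PySem.List.foldl_congr_mem
    intro acc j hj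
    have hj' := PySem.List.mem_pyRange_one.mp hj
    have h1 : PySem.List.pyGetD a j 0 = PySem.List.pyGetD (a.take i) j 0 := by
      rw [PySem.List.pyGetD_of_nonneg a 0 hj'.1, PySem.List.pyGetD_of_nonneg (a.take i) 0 hj'.1]
      have hjt : j.toNat < i := by omega
      simp [List.getD, hjt]
    rw [h1]
  rw [hcongr, ← hlen,
    PySem.List.foldl_pyRange_zero_pyGetD (a.take i) 0 (fun s x => s + x ^ 2) 0,
    PySem.List.foldl_add]
  simp [sumsq]
  ring_nf

theorem A_eq_E (a : List Int) : ellipsoid a = E a := by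
  unfold ellipsoid
  rw [show PySem.List.len a = ((a.length : Nat) : Int) by simp [PySem.List.len],
    PySem.List.pyRange_zero_nat, List.foldl_map, PySem.List.foldl_add]
  rw [zero_add]
  simp only [E]
  apply congrArg
  apply List.map_congr_left
  intro i hi
  exact inner_eq a i (le_of_lt (List.mem_range.mp hi))

theorem E_cons (x : Int) (xs : List Int) : E (x :: xs) = x * x * xs.length + E xs := by
  simp only [E, List.length_cons, List.range_succ_eq_map, List.map_cons, List.map_map]
  rw [List.sum_cons]
  rw [show (List.map ((fun i => sumsq (List.take i (x :: xs))) ∘ Nat.succ) (List.range xs.length))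
      = List.map (fun i => x * x + sumsq (List.take i xs)) (List.range xs.length) from
    List.map_congr_left (fun i _ => by simp [Function.comp, sumsq])]
  rw [PySem.List.sum_map_add_int, PySem.List.sum_map_const_int]
  simp only [sumsq, List.take_zero, List.map_nil, List.sum_nil, List.length_range, zero_add]
  ring

theorem B_loop (xs : List Int) (t r : Int) :
    (xs.foldl (fun (p : Int × Int) x => (p.1 + p.2, p.2 + x * x)) (t, r)).1
      = t + r * xs.length + E xs := by
  induction xs generalizing t r with
  | nil => simp [E]
  | cons x xs ih =>
    simp only [List.foldl_cons]
    rw [ih, E_cons]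
    simp only [List.length_cons]
    push_cast
    ring

-- ===== VERDICT =====
theorem ellipsoid_spec : Claim_equal_ellipsoid := by
  intro a _
  unfold Spec_ellipsoid ellipsoid_alt
  rw [B_loop, A_eq_E]
  ring
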